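-- pv_equiv track=rewrite | github.com/dioptra-io/georesolver | geogiant/ecs_vp_selection/hostname_selection.py | get_hostname_per_org_per_ns
-- ===== SOURCE A (Python) =====
-- from collections import defaultdict, OrderedDict
--
-- def get_hostname_per_org_per_ns(
--     hostname_per_name_server: list,
--     main_org_per_hostname: dict,
--     bgp_prefixes_per_hostname: dict,
-- ) -> dict[dict]:
--     """sort hostnames per org per name servers"""
--     hostname_per_org_per_name_servers = defaultdict(dict)
--     for name_server, hostnames in hostname_per_name_server:
--         for hostname in hostnames:
--             try:
--                 main_org = main_org_per_hostname[hostname]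
--             except KeyError:
--                 continue
--
--             len_bgp_prefixes = len(bgp_prefixes_per_hostname[hostname])
--
--             try:
--                 hostname_per_org_per_name_servers[name_server][main_org].append(
--                     (hostname, len_bgp_prefixes)
--                 )
--             except KeyError:
--                 hostname_per_org_per_name_servers[name_server][main_org] = [
--                     (hostname, len_bgp_prefixes)
--                 ]
--
--     # sort
--     for name_server, hostname_per_org in hostname_per_org_per_name_servers.items():
--         for org, hostname_bgp_prefixes in hostname_per_org.items():
--             hostname_per_org_per_name_servers[name_server][org] = sorted(
--                 hostname_bgp_prefixes, key=lambda x: x[-1], reverse=True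
--             )
--
--     return hostname_per_org_per_name_servers
-- ===== SOURCE B (Python) =====
-- from collections import defaultdict
--
--
-- def get_hostname_per_org_per_ns(
--     hostname_per_name_server: list,
--     main_org_per_hostname: dict,
--     bgp_prefixes_per_hostname: dict,
-- ) -> dict:
--     """Flatten, sort once globally, then group (keys primed in encounter order)."""
--     flat = []
--     for name_server, hostnames in hostname_per_name_server:
--         for hostname in hostnames:
--             if hostname not in main_org_per_hostname:
--                 continue
--             flat.append(
--                 (
--                     name_server,
--                     main_org_per_hostname[hostname],
--                     hostname,
--                     len(bgp_prefixes_per_hostname[hostname]),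
--                 )
--             )
--
--     result = defaultdict(dict)
--     # prime the name-server / org keys in first-encounter order
--     for name_server, org, _, _ in flat:
--         result[name_server].setdefault(org, [])
--     # one stable global sort by prefix count, descending, then group
--     for name_server, org, hostname, count in sorted(
--         flat, key=lambda t: t[3], reverse=True
--     ):
--         result[name_server][org].append((hostname, count))
--     return result
-- ===== Notes on version B (the rewrite author's own statement) =====
-- stated objective: alternative
-- what changed: Replaces the nested dict-building loop with per-group sorts by a flat single pass, one global stable sort by prefix count (reverse=True), and a grouping pass (keys primed in encounter order).
import Mathlib
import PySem

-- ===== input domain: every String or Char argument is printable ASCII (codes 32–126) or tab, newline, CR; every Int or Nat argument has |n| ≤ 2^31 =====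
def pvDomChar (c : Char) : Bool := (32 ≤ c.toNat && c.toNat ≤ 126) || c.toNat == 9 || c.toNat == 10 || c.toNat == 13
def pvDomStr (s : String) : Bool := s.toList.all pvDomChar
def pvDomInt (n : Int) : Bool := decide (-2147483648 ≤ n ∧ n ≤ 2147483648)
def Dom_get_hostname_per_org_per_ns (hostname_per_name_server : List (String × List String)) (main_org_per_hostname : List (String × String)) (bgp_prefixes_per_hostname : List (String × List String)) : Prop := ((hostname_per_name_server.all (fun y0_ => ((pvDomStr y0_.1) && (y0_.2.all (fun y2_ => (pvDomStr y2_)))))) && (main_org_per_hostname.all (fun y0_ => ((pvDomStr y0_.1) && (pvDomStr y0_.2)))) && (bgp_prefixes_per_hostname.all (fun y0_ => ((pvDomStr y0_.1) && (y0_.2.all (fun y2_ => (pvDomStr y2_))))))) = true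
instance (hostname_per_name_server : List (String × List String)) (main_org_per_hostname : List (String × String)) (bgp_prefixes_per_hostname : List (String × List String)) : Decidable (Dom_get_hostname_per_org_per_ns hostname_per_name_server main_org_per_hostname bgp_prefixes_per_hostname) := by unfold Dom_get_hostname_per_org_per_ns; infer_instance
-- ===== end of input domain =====

-- ===== PORT A =====
-- B replaces A's nested dict-building + per-group sorts by a flat pass, one global stable sort, and a grouping pass (alternative decomposition, same results).
-- Python dicts are association lists here; pvLookup is dict lookup (first match), pvSetk is dict assignment d[k]=f(d.get(k)) (overwrite in place, new key appended) — exact for Python dict semantics.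
def pvLookup {b : Type} (d : List (String × b)) (k : String) : Option b :=
  (d.find? (fun p => p.1 == k)).map (fun p => p.2)

def pvSetk {b : Type} (d : List (String × b)) (k : String) (f : Option b → b) : List (String × b) :=
  match d with
  | [] => [(k, f none)]
  | (k', v) :: rest => if k' == k then (k', f (some v)) :: rest else (k', v) :: pvSetk rest k f

def pvAStep (main_org_per_hostname : List (String × String)) (bgp_prefixes_per_hostname : List (String × List String)) (name_server : String) (d : List (String × List (String × List (String × Int)))) (hostname : String) : List (String × List (String × List (String × Int))) :=
  match pvLookup main_org_per_hostname hostname with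
  | none => d                                   -- except KeyError: continue
  | some main_org =>
    -- Python raises KeyError when hostname is missing from bgp_prefixes_per_hostname; Pre_ excludes that
    let len_bgp : Int := Int.ofNat ((pvLookup bgp_prefixes_per_hostname hostname).getD []).length
    pvSetk d name_server (fun inner? =>
      let inner := inner?.getD []               -- defaultdict access d[name_server]
      match pvLookup inner main_org with
      | some lst => pvSetk inner main_org (fun _ => lst ++ [(hostname, len_bgp)])   -- try: append
      | none => pvSetk inner main_org (fun _ => [(hostname, len_bgp)]))             -- except KeyError: fresh list

def get_hostname_per_org_per_ns (hostname_per_name_server : List (String × List String)) (main_org_per_hostname : List (String × String)) (bgp_prefixes_per_hostname : List (String × List String)) : List (String × List (String × List (String × Int))) :=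
  -- build loop (defaultdict(dict) with try/except KeyError, exactly A's branches, body = pvAStep)
  let build := hostname_per_name_server.foldl (fun d nsp =>
    nsp.2.foldl (pvAStep main_org_per_hostname bgp_prefixes_per_hostname nsp.1) d) []
  -- sort loop: each inner list replaced in place by sorted(…, key=lambda x: x[-1], reverse=True)
  build.map (fun nsp => (nsp.1, nsp.2.map (fun op => (op.1, PySem.List.sorted op.2 (fun x => x.2) true))))

-- ===== PORT B =====
-- first loop of Source B: the flat list of (name_server, org, hostname, count)
def pvFlatStep (main_org_per_hostname : List (String × String)) (bgp_prefixes_per_hostname : List (String × List String)) (name_server : String) (acc : List (String × String × String × Int)) (hostname : String) : List (String × String × String × Int) :=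
  match pvLookup main_org_per_hostname hostname with
  | none => acc                                 -- continue
  | some org => acc ++ [(name_server, org, hostname, Int.ofNat ((pvLookup bgp_prefixes_per_hostname hostname).getD []).length)]

def pvFlat (hostname_per_name_server : List (String × List String)) (main_org_per_hostname : List (String × String)) (bgp_prefixes_per_hostname : List (String × List String)) : List (String × String × String × Int) :=
  hostname_per_name_server.foldl (fun acc nsp =>
    nsp.2.foldl (pvFlatStep main_org_per_hostname bgp_prefixes_per_hostname nsp.1) acc) []

-- priming loop body: result[name_server].setdefault(org, [])
def pvPrime (d : List (String × List (String × List (String × Int)))) (t : String × String × String × Int) : List (String × List (String × List (String × Int))) :=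
  pvSetk d t.1 (fun inner? => pvSetk (inner?.getD []) t.2.1 (fun l? => l?.getD []))

-- grouping loop body: result[name_server][org].append((hostname, count)); both keys exist after priming
def pvApp (d : List (String × List (String × List (String × Int)))) (t : String × String × String × Int) : List (String × List (String × List (String × Int))) :=
  pvSetk d t.1 (fun inner? => pvSetk (inner?.getD []) t.2.1 (fun l? => (l?.getD []) ++ [(t.2.2.1, t.2.2.2)]))

def get_hostname_per_org_per_ns_alt (hostname_per_name_server : List (String × List String)) (main_org_per_hostname : List (String × String)) (bgp_prefixes_per_hostname : List (String × List String)) : List (String × List (String × List (String × Int))) :=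
  let flat := pvFlat hostname_per_name_server main_org_per_hostname bgp_prefixes_per_hostname
  let primed := flat.foldl pvPrime []
  (PySem.List.sorted flat (fun t => t.2.2.2) true).foldl pvApp primed

-- ===== PRECONDITION & SPEC =====
-- Pre_ excludes exactly the inputs where Python raises KeyError: some listed hostname has a main-org entry but no bgp-prefix entry.
def Pre_get_hostname_per_org_per_ns (hostname_per_name_server : List (String × List String)) (main_org_per_hostname : List (String × String)) (bgp_prefixes_per_hostname : List (String × List String)) : Prop :=
  ∀ p ∈ hostname_per_name_server, ∀ h ∈ p.2, (pvLookup main_org_per_hostname h).isSome → (pvLookup bgp_prefixes_per_hostname h).isSome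
instance (hostname_per_name_server : List (String × List String)) (main_org_per_hostname : List (String × String)) (bgp_prefixes_per_hostname : List (String × List String)) : Decidable (Pre_get_hostname_per_org_per_ns hostname_per_name_server main_org_per_hostname bgp_prefixes_per_hostname) := by unfold Pre_get_hostname_per_org_per_ns; infer_instance

def pvWitness_get_hostname_per_org_per_ns : (List (String × List String)) × (List (String × String)) × (List (String × List String)) :=
  ([("ns1", ["h1", "h2"])], [("h1", "orgA"), ("h2", "orgA")], [("h1", ["p1"]), ("h2", ["p2", "p3"])])

def Spec_get_hostname_per_org_per_ns (hostname_per_name_server : List (String × List String)) (main_org_per_hostname : List (String × String)) (bgp_prefixes_per_hostname : List (String × List String)) (out : List (String × List (String × List (String × Int)))) : Prop := out = get_hostname_per_org_per_ns_alt hostname_per_name_server main_org_per_hostname bgp_prefixes_per_hostname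
instance (hostname_per_name_server : List (String × List String)) (main_org_per_hostname : List (String × String)) (bgp_prefixes_per_hostname : List (String × List String)) (out : List (String × List (String × List (String × Int)))) : Decidable (Spec_get_hostname_per_org_per_ns hostname_per_name_server main_org_per_hostname bgp_prefixes_per_hostname out) := by unfold Spec_get_hostname_per_org_per_ns; infer_instance

-- ===== CLAIM (what is proved, stated in full; the proofs are below) =====
def Claim_equal_get_hostname_per_org_per_ns : Prop := ∀ (hostname_per_name_server : List (String × List String)) (main_org_per_hostname : List (String × String)) (bgp_prefixes_per_hostname : List (String × List String)), Dom_get_hostname_per_org_per_ns hostname_per_name_server main_org_per_hostname bgp_prefixes_per_hostname → Pre_get_hostname_per_org_per_ns hostname_per_name_server main_org_per_hostname bgp_prefixes_per_hostname → Spec_get_hostname_per_org_per_ns hostname_per_name_server main_org_per_hostname bgp_prefixes_per_hostname (get_hostname_per_org_per_ns hostname_per_name_server main_org_per_hostname bgp_prefixes_per_hostname)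

-- ===== LEMMAS AND PROOFS =====

-- canonical description of the grouped structure
def pvGrp (vs : List (String × String × String × Int)) (ns org : String) : List (String × Int) :=
  (vs.filter (fun t => t.1 == ns && t.2.1 == org)).map (fun t => (t.2.2.1, t.2.2.2))

def pvOrgs (ks : List (String × String × String × Int)) (ns : String) : List String :=
  PySem.List.dedup ((ks.filter (fun t => t.1 == ns)).map (fun t => t.2.1))

def pvAsm (ks vs : List (String × String × String × Int)) : List (String × List (String × List (String × Int))) :=
  (PySem.List.dedup (ks.map (fun t => t.1))).map (fun ns => (ns, (pvOrgs ks ns).map (fun org => (org, pvGrp vs ns org))))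

-- ----- basic facts about dedup (= PySem.Set.ofList), pvSetk, pvGrp, pvOrgs -----

theorem pv_mem_dedup {x : String} {xs : List String} : x ∈ PySem.List.dedup xs ↔ x ∈ xs := by
  unfold PySem.List.dedup; exact PySem.Set.mem_ofList xs x

theorem pv_nodup_dedup (xs : List String) : (PySem.List.dedup xs).Nodup := by
  unfold PySem.List.dedup; exact PySem.Set.nodup_ofList xs

theorem pv_add_eq (s : PySem.Set String) (x : String) :
    PySem.Set.add s x = if x ∈ s then s else s ++ [x] := by
  unfold PySem.Set.add
  have hc : (s.contains x = true) ↔ x ∈ s := by simp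
  by_cases h : x ∈ s
  · rw [if_pos (hc.2 h), if_pos h]
  · rw [if_neg (fun hh => h (hc.1 hh)), if_neg h]

theorem pv_dedup_append (xs : List String) (x : String) :
    PySem.List.dedup (xs ++ [x])
      = if x ∈ PySem.List.dedup xs then PySem.List.dedup xs else PySem.List.dedup xs ++ [x] := by
  unfold PySem.List.dedup PySem.Set.ofList
  rw [List.foldl_append, List.foldl_cons, List.foldl_nil, pv_add_eq]

theorem pv_setk_lookup_congr {β : Type} (d : List (String × β)) (k : String) (f : Option β → β) :
    pvSetk d k f = pvSetk d k (fun _ => f (pvLookup d k)) := by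
  induction d with
  | nil => rfl
  | cons kv rest ih =>
    obtain ⟨k', v⟩ := kv
    by_cases h : k' = k
    · simp [pvSetk, pvLookup, List.find?, h]
    · have hb : (k' == k) = false := beq_eq_false_iff_ne.2 h
      have hl : pvLookup ((k', v) :: rest) k = pvLookup rest k := by
        simp [pvLookup, List.find?, hb]
      simp only [pvSetk, hl]
      rw [if_neg (by simp [h]), if_neg (by simp [h])]
      exact congrArg _ ih

theorem pv_setk_map_mem {β : Type} (L : List String) (g : String → β) (k : String) (f : Option β → β)
    (hnd : L.Nodup) (hk : k ∈ L) :
    pvSetk (L.map (fun a => (a, g a))) k f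
      = L.map (fun a => (a, if a = k then f (some (g a)) else g a)) := by
  induction L with
  | nil => cases hk
  | cons a L ih =>
    rcases List.nodup_cons.1 hnd with ⟨ha, hndL⟩
    simp only [List.map_cons, pvSetk]
    by_cases hak : a = k
    · rw [if_pos (by simp [hak]), if_pos hak]
      subst hak
      congr 1
      refine (List.map_congr_left (fun b hb => ?_)).symm
      rw [if_neg (show ¬ b = a from fun hb2 => ha (hb2 ▸ hb))]
    · rw [if_neg (by simp [hak]), if_neg hak]
      rw [ih hndL (by
        rcases List.mem_cons.1 hk with h | h
        · exact absurd h.symm hak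
        · exact h)]

theorem pv_setk_map_not_mem {β : Type} (L : List String) (g : String → β) (k : String) (f : Option β → β)
    (hk : k ∉ L) :
    pvSetk (L.map (fun a => (a, g a))) k f = L.map (fun a => (a, g a)) ++ [(k, f none)] := by
  induction L with
  | nil => rfl
  | cons a L ih =>
    simp only [List.map_cons, pvSetk]
    rw [if_neg (by simp; exact fun h => hk (h ▸ List.mem_cons_self ..))]
    rw [ih (fun h => hk (List.mem_cons_of_mem a h))]
    rfl

theorem pv_grp_nil (ns org : String) : pvGrp [] ns org = [] := rfl

theorem pv_grp_append (vs : List (String × String × String × Int)) (t : String × String × String × Int) (ns org : String) :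
    pvGrp (vs ++ [t]) ns org
      = pvGrp vs ns org ++ (if t.1 = ns ∧ t.2.1 = org then [(t.2.2.1, t.2.2.2)] else []) := by
  unfold pvGrp
  rw [List.filter_append, List.map_append]
  congr 1
  by_cases h : t.1 = ns ∧ t.2.1 = org
  · rw [if_pos h]
    have hb1 : (t.1 == ns) = true := beq_iff_eq.2 h.1
    have hb2 : (t.2.1 == org) = true := beq_iff_eq.2 h.2
    simp [List.filter, hb1, hb2]
  · rw [if_neg h]
    have hb : (t.1 == ns && t.2.1 == org) = false := by
      rcases not_and_or.1 h with h' | h'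
      · simp [beq_eq_false_iff_ne.2 h']
      · simp [beq_eq_false_iff_ne.2 h']
    simp [List.filter, hb]

theorem pv_orgs_append (ks : List (String × String × String × Int)) (t : String × String × String × Int) (ns : String) :
    pvOrgs (ks ++ [t]) ns
      = if t.1 = ns then (if t.2.1 ∈ pvOrgs ks ns then pvOrgs ks ns else pvOrgs ks ns ++ [t.2.1])
        else pvOrgs ks ns := by
  unfold pvOrgs
  rw [List.filter_append]
  by_cases h : t.1 = ns
  · rw [if_pos h]
    have hf : List.filter (fun u => u.1 == ns) [t] = [t] := by simp [List.filter, beq_iff_eq.2 h]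
    rw [hf, List.map_append]
    simp only [List.map_cons, List.map_nil]
    exact pv_dedup_append _ _
  · rw [if_neg h]
    have hf : List.filter (fun u => u.1 == ns) [t] = [] := by simp [List.filter, beq_eq_false_iff_ne.2 h]
    rw [hf, List.append_nil]

theorem pv_mem_orgs (ks : List (String × String × String × Int)) (t : String × String × String × Int)
    (ht : t ∈ ks) : t.2.1 ∈ pvOrgs ks t.1 := by
  unfold pvOrgs
  exact pv_mem_dedup.2 (List.mem_map.2 ⟨t, List.mem_filter.2 ⟨ht, by simp⟩, rfl⟩)

theorem pv_orgs_nil_of_not_mem (ks : List (String × String × String × Int)) (ns : String)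
    (h : ns ∉ PySem.List.dedup (ks.map (fun t => t.1))) : pvOrgs ks ns = [] := by
  unfold pvOrgs
  have hf : ks.filter (fun u => u.1 == ns) = [] := by
    rw [List.filter_eq_nil_iff]
    intro u hu hb
    exact h (pv_mem_dedup.2 (List.mem_map.2 ⟨u, hu, by simpa using hb⟩))
  rw [hf]; rfl

theorem pv_nodup_orgs (ks : List (String × String × String × Int)) (ns : String) : (pvOrgs ks ns).Nodup := by
  unfold pvOrgs; exact pv_nodup_dedup _

theorem pv_grp_nil_of_not_orgs (ks vs : List (String × String × String × Int)) (ns org : String)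
    (hsub : ∀ u ∈ vs, u ∈ ks) (h : org ∉ pvOrgs ks ns) : pvGrp vs ns org = [] := by
  unfold pvGrp
  have hf : vs.filter (fun u => u.1 == ns && u.2.1 == org) = [] := by
    rw [List.filter_eq_nil_iff]
    intro u hu hb
    have hb' : u.1 = ns ∧ u.2.1 = org := by simpa using hb
    exact h (hb'.1 ▸ hb'.2 ▸ pv_mem_orgs ks u (hsub u hu))
  rw [hf]; rfl

-- ----- one pvApp / pvPrime step on the canonical structure -----

theorem pv_app_asm (ks vs : List (String × String × String × Int)) (t : String × String × String × Int)
    (H : t.2.1 ∉ pvOrgs ks t.1 → pvGrp vs t.1 t.2.1 = []) :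
    pvApp (pvAsm ks vs) t = pvAsm (ks ++ [t]) (vs ++ [t]) := by
  unfold pvApp pvAsm
  rw [List.map_append]
  simp only [List.map_cons, List.map_nil]
  rw [pv_dedup_append]
  by_cases hns : t.1 ∈ PySem.List.dedup (ks.map (fun t => t.1))
  · rw [if_pos hns]
    rw [pv_setk_map_mem _ _ _ _ (pv_nodup_dedup _) hns]
    refine List.map_congr_left (fun ns hnsD => ?_)
    by_cases h1 : ns = t.1
    · subst h1
      rw [if_pos rfl, pv_orgs_append, if_pos rfl]
      simp only [Option.getD_some]
      by_cases h2 : t.2.1 ∈ pvOrgs ks t.1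
      · rw [if_pos h2, pv_setk_map_mem _ _ _ _ (pv_nodup_orgs ks t.1) h2]
        refine congrArg _ (List.map_congr_left (fun org horg => ?_))
        rw [pv_grp_append]
        by_cases h3 : org = t.2.1
        · subst h3
          rw [if_pos rfl, if_pos ⟨rfl, rfl⟩]
          simp
        · rw [if_neg h3, if_neg (fun hc => h3 hc.2.symm)]
          simp
      · rw [if_neg h2, pv_setk_map_not_mem _ _ _ _ h2, List.map_append]
        refine congrArg _ (congrArg₂ (fun (a b : List (String × List (String × Int))) => a ++ b) ?_ ?_)
        · refine List.map_congr_left (fun org horg => ?_)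
          rw [pv_grp_append, if_neg (fun hc => h2 (by rw [hc.2]; exact horg))]
          simp
        · simp only [List.map_cons, List.map_nil]
          rw [pv_grp_append, H h2, if_pos ⟨rfl, rfl⟩]
          simp
    · rw [if_neg h1, pv_orgs_append, if_neg (fun hc => h1 hc.symm)]
      refine congrArg _ (List.map_congr_left (fun org horg => ?_))
      rw [pv_grp_append, if_neg (fun hc => h1 hc.1.symm)]
      simp
  · rw [if_neg hns]
    rw [pv_setk_map_not_mem _ _ _ _ hns, List.map_append]
    refine congrArg₂ (fun (a b : List (String × List (String × List (String × Int)))) => a ++ b) ?_ ?_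
    · refine List.map_congr_left (fun ns hnsD => ?_)
      have h1 : ns ≠ t.1 := fun hc => hns (hc ▸ hnsD)
      rw [pv_orgs_append, if_neg (fun hc => h1 hc.symm)]
      refine congrArg _ (List.map_congr_left (fun org horg => ?_))
      rw [pv_grp_append, if_neg (fun hc => h1 hc.1.symm)]
      simp
    · simp only [List.map_cons, List.map_nil]
      have horgs : pvOrgs ks t.1 = [] := pv_orgs_nil_of_not_mem ks t.1 hns
      have hg : pvGrp vs t.1 t.2.1 = [] := H (by rw [horgs]; exact List.not_mem_nil)
      rw [pv_orgs_append, if_pos rfl, horgs, if_neg List.not_mem_nil]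
      simp only [Option.getD_none, List.nil_append, List.map_cons, List.map_nil]
      rw [pv_grp_append, hg, if_pos ⟨rfl, rfl⟩]
      simp [pvSetk]

theorem pv_prime_asm (ks : List (String × String × String × Int)) (t : String × String × String × Int) :
    pvPrime (pvAsm ks []) t = pvAsm (ks ++ [t]) [] := by
  unfold pvPrime pvAsm
  rw [List.map_append]
  simp only [List.map_cons, List.map_nil]
  rw [pv_dedup_append]
  by_cases hns : t.1 ∈ PySem.List.dedup (ks.map (fun t => t.1))
  · rw [if_pos hns]
    rw [pv_setk_map_mem _ _ _ _ (pv_nodup_dedup _) hns]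
    refine List.map_congr_left (fun ns hnsD => ?_)
    by_cases h1 : ns = t.1
    · subst h1
      rw [if_pos rfl, pv_orgs_append, if_pos rfl]
      simp only [Option.getD_some]
      by_cases h2 : t.2.1 ∈ pvOrgs ks t.1
      · rw [if_pos h2, pv_setk_map_mem _ _ _ _ (pv_nodup_orgs ks t.1) h2]
        refine congrArg _ (List.map_congr_left (fun org horg => ?_))
        simp
      · rw [if_neg h2, pv_setk_map_not_mem _ _ _ _ h2]
        rw [List.map_append]
        simp [pv_grp_nil]
    · rw [if_neg h1, pv_orgs_append, if_neg (fun hc => h1 hc.symm)]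
  · rw [if_neg hns]
    rw [pv_setk_map_not_mem _ _ _ _ hns, List.map_append]
    refine congrArg₂ (fun (a b : List (String × List (String × List (String × Int)))) => a ++ b) ?_ ?_
    · refine List.map_congr_left (fun ns hnsD => ?_)
      have h1 : ns ≠ t.1 := fun hc => hns (hc ▸ hnsD)
      rw [pv_orgs_append, if_neg (fun hc => h1 hc.symm)]
    · have horgs : pvOrgs ks t.1 = [] := pv_orgs_nil_of_not_mem ks t.1 hns
      simp only [List.map_cons, List.map_nil]
      rw [pv_orgs_append, if_pos rfl, horgs, if_neg List.not_mem_nil]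
      simp [pvSetk, pv_grp_nil]

theorem pv_asm_append_mem (fl vs : List (String × String × String × Int)) (t : String × String × String × Int)
    (ht : t ∈ fl) : pvAsm (fl ++ [t]) vs = pvAsm fl vs := by
  unfold pvAsm
  rw [List.map_append]
  simp only [List.map_cons, List.map_nil]
  rw [pv_dedup_append, if_pos (pv_mem_dedup.2 (List.mem_map.2 ⟨t, ht, rfl⟩))]
  refine List.map_congr_left (fun ns hns => ?_)
  rw [pv_orgs_append]
  by_cases h : t.1 = ns
  · rw [if_pos h, if_pos (h ▸ pv_mem_orgs fl t ht)]
  · rw [if_neg h]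

-- ----- the three structural theorems -----

theorem pv_build_eq_asm (fl : List (String × String × String × Int)) :
    fl.foldl pvApp [] = pvAsm fl fl := by
  induction fl using List.reverseRecOn with
  | nil => rfl
  | append_singleton fl t ih =>
    rw [List.foldl_append, List.foldl_cons, List.foldl_nil, ih]
    exact pv_app_asm fl fl t (fun h => pv_grp_nil_of_not_orgs fl fl t.1 t.2.1 (fun u hu => hu) h)

theorem pv_prime_eq_asm (fl : List (String × String × String × Int)) :
    fl.foldl pvPrime [] = pvAsm fl [] := by
  have aux : ∀ (ks : List (String × String × String × Int)), ks.foldl pvPrime [] = pvAsm ks [] := by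
    intro ks
    induction ks using List.reverseRecOn with
    | nil => rfl
    | append_singleton ks t ih =>
      rw [List.foldl_append, List.foldl_cons, List.foldl_nil, ih]
      exact pv_prime_asm ks t
  exact aux fl

theorem pv_app_fold_asm (fl : List (String × String × String × Int)) (ys : List (String × String × String × Int))
    (hsub : ∀ t ∈ ys, t ∈ fl) :
    ys.foldl pvApp (pvAsm fl []) = pvAsm fl ys := by
  induction ys using List.reverseRecOn with
  | nil => rfl
  | append_singleton ys t ih =>
    rw [List.foldl_append, List.foldl_cons, List.foldl_nil,
        ih (fun u hu => hsub u (List.mem_append_left _ hu))]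
    have ht : t ∈ fl := hsub t (by simp)
    have hmemorg : t.2.1 ∈ pvOrgs fl t.1 := pv_mem_orgs fl t ht
    rw [pv_app_asm fl ys t (fun h => absurd hmemorg h)]
    exact pv_asm_append_mem fl (ys ++ [t]) t ht

-- ----- stable sort commutes with filter (on a descending-sorted accumulator) and with the projection -----

theorem pv_ins_cons {α : Type} (before : α → α → Bool) (x y : α) (ys : List α) :
    PySem.List.insertBy before x (y :: ys)
      = if before x y then x :: y :: ys else y :: PySem.List.insertBy before x ys := by
  simp [PySem.List.insertBy]

theorem pv_ins_all_lt (x : String × String × String × Int) (l : List (String × String × String × Int))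
    (h : ∀ z ∈ l, z.2.2.2 < x.2.2.2) :
    PySem.List.insertBy (fun a b => decide (b.2.2.2 < a.2.2.2)) x l = x :: l := by
  cases l with
  | nil => rfl
  | cons y ys => rw [pv_ins_cons, if_pos (by simp [h y (by simp)])]

theorem pv_ins_pairwise (x : String × String × String × Int) (l : List (String × String × String × Int))
    (h : l.Pairwise (fun a b => b.2.2.2 ≤ a.2.2.2)) :
    (PySem.List.insertBy (fun a b => decide (b.2.2.2 < a.2.2.2)) x l).Pairwise (fun a b => b.2.2.2 ≤ a.2.2.2) := by
  induction l with
  | nil => simp [PySem.List.insertBy]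
  | cons y ys ih =>
    rw [pv_ins_cons]
    rcases List.pairwise_cons.1 h with ⟨hy, hys⟩
    by_cases hlt : y.2.2.2 < x.2.2.2
    · rw [if_pos (by simp [hlt])]
      refine List.pairwise_cons.2 ⟨?_, h⟩
      intro z hz
      rcases List.mem_cons.1 hz with hz | hz
      · subst hz; omega
      · exact le_of_lt (lt_of_le_of_lt (hy z hz) hlt)
    · rw [if_neg (by simp [hlt])]
      refine List.pairwise_cons.2 ⟨?_, ih hys⟩
      intro z hz
      rcases (PySem.List.mem_insertBy _ _ _ _).1 hz with hz | hz
      · subst hz; omega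
      · exact hy z hz

theorem pv_filter_ins (p : (String × String × String × Int) → Bool)
    (x : String × String × String × Int) (ys : List (String × String × String × Int))
    (h : ys.Pairwise (fun a b => b.2.2.2 ≤ a.2.2.2)) :
    (PySem.List.insertBy (fun a b => decide (b.2.2.2 < a.2.2.2)) x ys).filter p
      = if p x then PySem.List.insertBy (fun a b => decide (b.2.2.2 < a.2.2.2)) x (ys.filter p) else ys.filter p := by
  induction ys with
  | nil => simp [PySem.List.insertBy, List.filter_cons]
  | cons y ys ih =>
    rcases List.pairwise_cons.1 h with ⟨hy, hys⟩
    rw [pv_ins_cons]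
    by_cases hlt : y.2.2.2 < x.2.2.2
    · rw [if_pos (by simp [hlt])]
      by_cases hp : p x
      · rw [if_pos hp, pv_ins_all_lt x ((y :: ys).filter p)]
        · simp [List.filter_cons, hp]
        · intro z hz
          rcases List.mem_filter.1 hz with ⟨hz, _⟩
          rcases List.mem_cons.1 hz with hz | hz
          · subst hz; omega
          · exact lt_of_le_of_lt (hy z hz) hlt
      · simp [List.filter_cons, hp]
    · rw [if_neg (by simp [hlt])]
      by_cases hpy : p y
      · simp only [List.filter_cons, hpy, if_true]
        rw [ih hys]
        by_cases hp : p x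
        · rw [if_pos hp, if_pos hp, pv_ins_cons, if_neg (by simp [hlt])]
        · rw [if_neg hp, if_neg hp]
      · simp only [List.filter_cons, hpy]
        simp only [Bool.false_eq_true, if_false]
        rw [ih hys]

theorem pv_filter_foldl_ins (p : (String × String × String × Int) → Bool)
    (xs : List (String × String × String × Int)) :
    ∀ acc, acc.Pairwise (fun a b => b.2.2.2 ≤ a.2.2.2) →
    (xs.foldl (fun acc x => PySem.List.insertBy (fun a b => decide (b.2.2.2 < a.2.2.2)) x acc) acc).filter p
      = (xs.filter p).foldl (fun acc x => PySem.List.insertBy (fun a b => decide (b.2.2.2 < a.2.2.2)) x acc) (acc.filter p) := by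
  induction xs with
  | nil => intro acc _; rfl
  | cons x xs ih =>
    intro acc hacc
    simp only [List.foldl_cons, List.filter_cons]
    rw [ih _ (pv_ins_pairwise x acc hacc), pv_filter_ins p x acc hacc]
    by_cases hp : p x
    · simp [hp]
    · simp [hp]

theorem pv_filter_sorted (xs : List (String × String × String × Int)) (p : (String × String × String × Int) → Bool) :
    (PySem.List.sorted xs (fun t => t.2.2.2) true).filter p = PySem.List.sorted (xs.filter p) (fun t => t.2.2.2) true := by
  rw [PySem.List.sorted_rev_eq_foldl_insertBy xs (fun t => t.2.2.2),
      PySem.List.sorted_rev_eq_foldl_insertBy (xs.filter p) (fun t => t.2.2.2)]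
  exact pv_filter_foldl_ins p xs [] (by simp)

theorem pv_ins_map (x : String × String × String × Int) (ys : List (String × String × String × Int)) :
    (PySem.List.insertBy (fun a b => decide (b.2.2.2 < a.2.2.2)) x ys).map (fun t => (t.2.2.1, t.2.2.2))
      = PySem.List.insertBy (fun (a b : String × Int) => decide (b.2 < a.2)) (x.2.2.1, x.2.2.2) (ys.map (fun t => (t.2.2.1, t.2.2.2))) := by
  induction ys with
  | nil => rfl
  | cons y ys ih =>
    rw [pv_ins_cons, List.map_cons, pv_ins_cons]
    by_cases hlt : y.2.2.2 < x.2.2.2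
    · rw [if_pos (by simp [hlt]), if_pos (by simp [hlt])]
      rfl
    · rw [if_neg (by simp [hlt]), if_neg (by simp [hlt]), List.map_cons, ih]

theorem pv_map_sorted (xs : List (String × String × String × Int)) :
    (PySem.List.sorted xs (fun t => t.2.2.2) true).map (fun t => (t.2.2.1, t.2.2.2))
      = PySem.List.sorted (xs.map (fun t => (t.2.2.1, t.2.2.2))) (fun x => x.2) true := by
  rw [PySem.List.sorted_rev_eq_foldl_insertBy xs (fun t => t.2.2.2),
      PySem.List.sorted_rev_eq_foldl_insertBy (xs.map (fun t => (t.2.2.1, t.2.2.2))) (fun x => x.2)]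
  have aux : ∀ (ys acc : List (String × String × String × Int)),
      (ys.foldl (fun acc x => PySem.List.insertBy (fun a b => decide (b.2.2.2 < a.2.2.2)) x acc) acc).map (fun t => (t.2.2.1, t.2.2.2))
        = (ys.map (fun t => (t.2.2.1, t.2.2.2))).foldl (fun acc x => PySem.List.insertBy (fun (a b : String × Int) => decide (b.2 < a.2)) x acc) (acc.map (fun t => (t.2.2.1, t.2.2.2))) := by
    intro ys
    induction ys with
    | nil => intro acc; rfl
    | cons y ys ih => intro acc; simp only [List.foldl_cons, List.map_cons]; rw [ih, pv_ins_map]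
  exact aux xs []

theorem pv_Astep_eq (mo : List (String × String)) (bgp : List (String × List String)) (ns : String)
    (d : List (String × List (String × List (String × Int)))) (h : String) :
    pvAStep mo bgp ns d h
      = match pvLookup mo h with
        | none => d
        | some org => pvApp d (ns, org, h, Int.ofNat ((pvLookup bgp h).getD []).length) := by
  unfold pvAStep pvApp
  cases hmo : pvLookup mo h with
  | none => rfl
  | some org =>
    show pvSetk d ns _ = pvSetk d ns _
    refine congrArg _ ?_
    funext inner?
    show (match pvLookup (inner?.getD []) org with
          | some lst => pvSetk (inner?.getD []) org (fun _ => lst ++ [(h, Int.ofNat ((pvLookup bgp h).getD []).length)])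
          | none => pvSetk (inner?.getD []) org (fun _ => [(h, Int.ofNat ((pvLookup bgp h).getD []).length)]))
        = pvSetk (inner?.getD []) org (fun l? => (l?.getD []) ++ [(h, Int.ofNat ((pvLookup bgp h).getD []).length)])
    cases hlk : pvLookup (inner?.getD []) org with
    | none =>
      conv_rhs => rw [pv_setk_lookup_congr (inner?.getD []) org]
      simp [hlk]
    | some lst =>
      conv_rhs => rw [pv_setk_lookup_congr (inner?.getD []) org]
      simp [hlk]

theorem pv_flat_inner_acc (mo : List (String × String)) (bgp : List (String × List String)) (ns : String)
    (hs : List String) :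
    ∀ acc, hs.foldl (pvFlatStep mo bgp ns) acc = acc ++ hs.foldl (pvFlatStep mo bgp ns) [] := by
  induction hs with
  | nil => intro acc; simp
  | cons h hs ih =>
    intro acc
    simp only [List.foldl_cons]
    cases hmo : pvLookup mo h with
    | none =>
      have h1 : ∀ a, pvFlatStep mo bgp ns a h = a := by intro a; unfold pvFlatStep; simp [hmo]
      rw [h1, h1]; exact ih acc
    | some org =>
      have h1 : ∀ a, pvFlatStep mo bgp ns a h = a ++ [(ns, org, h, Int.ofNat ((pvLookup bgp h).getD []).length)] := by
        intro a; unfold pvFlatStep; simp [hmo]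
      rw [h1, h1, ih (acc ++ _), ih ([] ++ _), List.nil_append, List.append_assoc]

theorem pv_flat_outer_acc (mo : List (String × String)) (bgp : List (String × List String))
    (hns : List (String × List String)) :
    ∀ acc, hns.foldl (fun acc nsp => nsp.2.foldl (pvFlatStep mo bgp nsp.1) acc) acc
      = acc ++ hns.foldl (fun acc nsp => nsp.2.foldl (pvFlatStep mo bgp nsp.1) acc) [] := by
  induction hns with
  | nil => intro acc; simp
  | cons nsp hns ih =>
    intro acc
    simp only [List.foldl_cons]
    rw [ih (nsp.2.foldl (pvFlatStep mo bgp nsp.1) acc), ih (nsp.2.foldl (pvFlatStep mo bgp nsp.1) []),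
        pv_flat_inner_acc mo bgp nsp.1 nsp.2 acc, List.append_assoc]

theorem pv_A_inner (mo : List (String × String)) (bgp : List (String × List String)) (ns : String)
    (hs : List String) :
    ∀ d : List (String × List (String × List (String × Int))),
    hs.foldl (pvAStep mo bgp ns) d = (hs.foldl (pvFlatStep mo bgp ns) []).foldl pvApp d := by
  induction hs with
  | nil => intro d; rfl
  | cons h hs ih =>
    intro d
    simp only [List.foldl_cons]
    rw [pv_Astep_eq]
    cases hmo : pvLookup mo h with
    | none =>
      have h1 : pvFlatStep mo bgp ns [] h = [] := by unfold pvFlatStep; simp [hmo]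
      simp only [h1]
      exact ih d
    | some org =>
      have h1 : pvFlatStep mo bgp ns [] h = [(ns, org, h, Int.ofNat ((pvLookup bgp h).getD []).length)] := by
        unfold pvFlatStep; simp [hmo]
      simp only [h1]
      rw [pv_flat_inner_acc mo bgp ns hs [(ns, org, h, Int.ofNat ((pvLookup bgp h).getD []).length)],
          List.foldl_append, List.foldl_cons, List.foldl_nil]
      exact ih _

theorem pv_A_loop (mo : List (String × String)) (bgp : List (String × List String))
    (hns : List (String × List String)) :
    ∀ d : List (String × List (String × List (String × Int))),
    hns.foldl (fun d nsp => nsp.2.foldl (pvAStep mo bgp nsp.1) d) d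
      = (pvFlat hns mo bgp).foldl pvApp d := by
  unfold pvFlat
  induction hns with
  | nil => intro d; rfl
  | cons nsp hns ih =>
    intro d
    simp only [List.foldl_cons]
    rw [pv_A_inner mo bgp nsp.1 nsp.2 d, ih _,
        pv_flat_outer_acc mo bgp hns (nsp.2.foldl (pvFlatStep mo bgp nsp.1) []), List.foldl_append]

theorem pv_A_flat (hostname_per_name_server : List (String × List String)) (main_org_per_hostname : List (String × String)) (bgp_prefixes_per_hostname : List (String × List String)) :
    get_hostname_per_org_per_ns hostname_per_name_server main_org_per_hostname bgp_prefixes_per_hostname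
      = (pvAsm (pvFlat hostname_per_name_server main_org_per_hostname bgp_prefixes_per_hostname) (pvFlat hostname_per_name_server main_org_per_hostname bgp_prefixes_per_hostname)).map
          (fun nsp => (nsp.1, nsp.2.map (fun op => (op.1, PySem.List.sorted op.2 (fun x => x.2) true)))) := by
  unfold get_hostname_per_org_per_ns
  show (List.foldl (fun d nsp => nsp.2.foldl (pvAStep main_org_per_hostname bgp_prefixes_per_hostname nsp.1) d) [] hostname_per_name_server).map
      (fun nsp => (nsp.1, nsp.2.map (fun op => (op.1, PySem.List.sorted op.2 (fun x => x.2) true)))) = _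
  rw [pv_A_loop main_org_per_hostname bgp_prefixes_per_hostname hostname_per_name_server [],
      pv_build_eq_asm]

-- ===== VERDICT (by name: the statement is the Claim_ definition above) =====
theorem get_hostname_per_org_per_ns_spec : Claim_equal_get_hostname_per_org_per_ns := by
  intro hns mo bgp _ _
  unfold Spec_get_hostname_per_org_per_ns get_hostname_per_org_per_ns_alt
  show _ = List.foldl pvApp (List.foldl pvPrime [] (pvFlat hns mo bgp)) (PySem.List.sorted (pvFlat hns mo bgp) (fun t => t.2.2.2) true)
  rw [pv_A_flat, pv_prime_eq_asm, pv_app_fold_asm _ _ (fun t ht => (PySem.List.mem_sorted _ _ _ _).1 ht)]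
  unfold pvAsm
  rw [List.map_map]
  refine List.map_congr_left (fun ns _ => ?_)
  simp only [Function.comp_apply, List.map_map]
  refine congrArg _ (List.map_congr_left (fun org _ => ?_))
  simp only [Function.comp_apply]
  refine congrArg _ ?_
  show PySem.List.sorted (pvGrp (pvFlat hns mo bgp) ns org) (fun x => x.2) true = pvGrp (PySem.List.sorted (pvFlat hns mo bgp) (fun t => t.2.2.2) true) ns org
  unfold pvGrp
  rw [pv_filter_sorted, pv_map_sorted]
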